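-- pv_equiv track=rewrite | github.com/qWeX23/watbot | src/bot/functions/poll.py | parse_poll
-- ===== SOURCE A (Python) =====
-- def parse_poll(poll):
--     found_question = False
--     question = ''
--     answers=[]
--     for word in poll:
--         if not found_question:
--             question += ' ' + word
--         else:
--             answers.append(word)
--         if '?' in word:
--             found_question = True
--     if found_question:
--         return (question,answers)
--     else:
--         return None
-- ===== SOURCE B (Python) =====
-- def parse_poll(poll):
--     i = next((j for j, w in enumerate(poll) if '?' in w), None)
--     if i is None:
--         return None
--     return (' ' + ' '.join(poll[:i + 1]), poll[i + 1:])
-- ===== Notes on version B (the rewrite author's own statement) =====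
-- stated objective: simpler
-- what changed: Replaces the flag-driven accumulator loop by locating the index of the first word containing '?' and building the result with slice/join.
import Mathlib
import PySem

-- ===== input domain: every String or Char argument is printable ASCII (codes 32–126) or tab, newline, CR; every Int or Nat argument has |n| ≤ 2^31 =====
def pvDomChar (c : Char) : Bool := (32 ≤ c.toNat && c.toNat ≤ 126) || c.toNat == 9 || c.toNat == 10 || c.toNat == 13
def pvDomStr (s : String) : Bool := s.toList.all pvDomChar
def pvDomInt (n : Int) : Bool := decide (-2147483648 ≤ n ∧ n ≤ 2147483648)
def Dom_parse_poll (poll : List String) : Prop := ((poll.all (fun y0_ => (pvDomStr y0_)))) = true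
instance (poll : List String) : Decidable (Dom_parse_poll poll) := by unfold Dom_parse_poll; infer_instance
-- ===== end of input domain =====

-- B: instead of A's flag-driven accumulator loop, find the index of the first '?'-word
-- and build the result with slice/join (objective: simpler decomposition; same cost).

-- ===== PORT A =====
-- the for-loop of A as structural recursion over the SAME state (found, question, answers)
def parse_poll.go : List String → Bool → String → List String → Option (String × List String)
  | [], found, question, answers => if found then some (question, answers) else none
  | word :: rest, found, question, answers =>
    let question' := if !found then question ++ " " ++ word else question
    let answers' := if !found then answers else answers ++ [word]
    let found' := if PySem.Str.isIn "?" word then true else found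
    parse_poll.go rest found' question' answers'

def parse_poll (poll : List String) : Option (String × List String) :=
  parse_poll.go poll false "" []

-- ===== PORT B =====
-- next((j for j, w in enumerate(poll) if '?' in w), None) as a scan for the first index
def parse_poll_alt.findQ : List String → Option Nat
  | [] => none
  | w :: ws => if PySem.Str.isIn "?" w then some 0 else (parse_poll_alt.findQ ws).map (· + 1)

def parse_poll_alt (poll : List String) : Option (String × List String) :=
  match parse_poll_alt.findQ poll with
  | none => none
  | some i =>
      some (" " ++ PySem.Str.join " " (PySem.List.slice poll none (some ((i : Int) + 1))),
            PySem.List.slice poll (some ((i : Int) + 1)) none)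

-- ===== PRECONDITION & SPEC =====
def Spec_parse_poll (poll : List String) (out : Option (String × List String)) : Prop := out = parse_poll_alt poll
instance (poll : List String) (out : Option (String × List String)) : Decidable (Spec_parse_poll poll out) := by unfold Spec_parse_poll; infer_instance

-- ===== CLAIM (what is proved, stated in full; the proofs are below) =====
def Claim_equal_parse_poll : Prop := ∀ (poll : List String), Dom_parse_poll poll → Spec_parse_poll poll (parse_poll poll)

-- ===== LEMMAS AND PROOFS =====

-- ' ' + word for each of a list of words, appended
def pvH : List String → String
  | [] => ""
  | w :: ws => " " ++ w ++ pvH ws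

theorem pvH_join : ∀ (w : String) (ws : List String),
    (" " : String) ++ PySem.Str.join " " (w :: ws) = " " ++ w ++ pvH ws := by
  intro w ws
  induction ws generalizing w with
  | nil => simp [PySem.Str.join, pvH, PySem.Chars.join_singleton]
  | cons b rest ih =>
    have h := ih b
    rw [← String.toList_inj] at h ⊢
    simp [PySem.Str.join, PySem.Chars.join_cons_cons, pvH] at h ⊢
    simp [h]

theorem go_found : ∀ (ws : List String) (q : String) (ans : List String),
    parse_poll.go ws true q ans = some (q, ans ++ ws) := by
  intro ws
  induction ws with
  | nil => simp [parse_poll.go]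
  | cons w rest ih => intro q ans; simp [parse_poll.go, ih]

theorem go_notfound : ∀ (ws : List String) (q : String) (ans : List String),
    parse_poll.go ws false q ans =
      (parse_poll_alt.findQ ws).map
        (fun i => (q ++ pvH (ws.take (i + 1)), ans ++ ws.drop (i + 1))) := by
  intro ws
  induction ws with
  | nil => simp [parse_poll.go, parse_poll_alt.findQ]
  | cons w rest ih =>
    intro q ans
    by_cases h : PySem.Chars.isIn ['?'] w.toList = true
    · simp [parse_poll.go, parse_poll_alt.findQ, h, go_found, pvH, String.append_assoc]
    · simp only [Bool.not_eq_true] at h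
      simp [parse_poll.go, parse_poll_alt.findQ, h, ih, pvH, Function.comp_def,
        String.append_assoc]

-- ===== VERDICT (by name: the statement is the Claim_ definition above) =====
theorem parse_poll_spec : Claim_equal_parse_poll := by
  intro poll _
  unfold Spec_parse_poll parse_poll parse_poll_alt
  rw [go_notfound]
  cases hf : parse_poll_alt.findQ poll with
  | none => simp
  | some i =>
    have hne : poll.take (i + 1) ≠ [] := by
      cases poll with
      | nil => simp [parse_poll_alt.findQ] at hf
      | cons a l => simp
    obtain ⟨w, ws, hw⟩ := List.exists_cons_of_ne_nil hne
    have h1 : (((i : Nat) : Int) + 1) = (((i + 1 : Nat) : Int)) := by push_cast; ring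
    simp only [Option.map_some, h1, PySem.List.slice_to_natCast, PySem.List.slice_from_natCast]
    rw [hw, pvH_join]
    simp [pvH]
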